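-- pv_equiv track=rewrite | github.com/juliahuergo/Hackerrank | Greedy florist.py | getMinimumCost
-- ===== SOURCE A (Python) =====
-- def getMinimumCost(k, c):
--     if k >= len(c):
--         return sum(c)
--
--     #there are more flowers than people
--     c.sort(reverse=True)
--     ans = 0
--     overcost = 0
--
--     i = 0
--     while i < len(c):
--
--         for j in range(k):
--             if i >= len(c): return ans
--             ans += c[i] * (overcost + 1)
--             i += 1
--
--         overcost += 1
--
--     return ans
-- ===== SOURCE B (Python) =====
-- def getMinimumCost(k, c):
--     if k >= len(c):
--         return sum(c)
--     c.sort(reverse=True)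
--     # Incremental charging: every round of k purchases raises the price of each
--     # still-unbought flower by one more unit of its base price, so each round we
--     # simply pay the total base price of everything not yet bought.
--     remaining = sum(c)
--     ans = 0
--     start = 0
--     while start < len(c):
--         ans += remaining
--         remaining -= sum(c[start:start + k])
--         start += k
--     return ans
-- ===== Notes on version B (the rewrite author's own statement) =====
-- stated objective: alternative
-- what changed: Replaced A's per-flower accounting (nested while/for with an explicit overcost multiplier applied to each item) by an incremental-charging scheme: no multipliers at all, each round of k purchases adds the total base price of all still-unbought flowers to the answer and subtracts the round's chunk from that running suffix total (the in-place reverse sort is preserved).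
import Mathlib
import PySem

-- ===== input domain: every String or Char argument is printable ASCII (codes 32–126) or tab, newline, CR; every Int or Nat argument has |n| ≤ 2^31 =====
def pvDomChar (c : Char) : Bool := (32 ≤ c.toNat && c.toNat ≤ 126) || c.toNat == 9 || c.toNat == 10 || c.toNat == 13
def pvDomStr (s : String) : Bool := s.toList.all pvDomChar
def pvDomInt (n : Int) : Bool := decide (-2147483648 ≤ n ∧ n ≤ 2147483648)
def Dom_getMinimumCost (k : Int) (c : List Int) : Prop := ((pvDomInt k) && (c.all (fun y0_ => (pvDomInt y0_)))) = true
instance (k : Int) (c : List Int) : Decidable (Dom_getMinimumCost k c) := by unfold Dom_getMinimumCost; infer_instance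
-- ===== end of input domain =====

-- B replaces A's per-flower multiplier accounting by an incremental-charging scheme: each
-- round of k purchases adds the total base price of everything still unbought (objective:
-- alternative). Both A and B sort the argument list in place; the theorems are about the
-- return value.

-- ===== PORT A =====
-- inner `for j in range(k)` loop: .inl = the early `return ans`, .inr = fall through with (i, ans)
def pvAInner (cs : List Int) (overcost : Nat) : Nat → Nat → Int → Sum Int (Nat × Int)
  | 0, i, ans => .inr (i, ans)
  | n + 1, i, ans =>
    if cs.length ≤ i then .inl ans
    else pvAInner cs overcost n (i + 1) (ans + cs.getD i 0 * ((overcost : Int) + 1))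

-- outer `while i < len(c)` loop; fuel bounds the number of outer iterations (ample inside Pre_)
def pvAOuter (cs : List Int) (k : Nat) : Nat → Nat → Int → Nat → Int
  | 0, _, ans, _ => ans
  | fuel + 1, i, ans, overcost =>
    if i < cs.length then
      match pvAInner cs overcost k i ans with
      | .inl a => a
      | .inr (i', a') => pvAOuter cs k fuel i' a' (overcost + 1)
    else ans

def getMinimumCost (k : Int) (c : List Int) : Int :=
  if (c.length : Int) ≤ k then c.sum
  else
    let s := PySem.List.sorted c (fun x => x) true
    pvAOuter s k.toNat (c.length + 1) 0 0 0

-- ===== PORT B =====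
-- `while start < len(c)` loop of Source B; fuel bounds the number of rounds (ample inside Pre_)
def pvBLoop (s : List Int) (K : Nat) : Nat → Nat → Int → Int → Int
  | 0, _, ans, _ => ans
  | fuel + 1, start, ans, remaining =>
    if start < s.length then
      pvBLoop s K fuel (start + K) (ans + remaining)
        (remaining - (PySem.List.slice s (some (start : Int)) (some ((start : Int) + (K : Int)))).sum)
    else ans

def getMinimumCost_alt (k : Int) (c : List Int) : Int :=
  if (c.length : Int) ≤ k then c.sum
  else
    let s := PySem.List.sorted c (fun x => x) true
    pvBLoop s k.toNat (s.length + 1) 0 0 s.sum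

-- ===== PRECONDITION & SPEC =====
-- Pre_ excludes k ≤ 0 with len(c) > k: there A's while-loop never advances i (range(k) is
-- empty), so A loops forever, and B's while-loop never advances start, so B loops forever too.
def Pre_getMinimumCost (k : Int) (c : List Int) : Prop := (c.length : Int) ≤ k ∨ 1 ≤ k ∨ c = []
instance (k : Int) (c : List Int) : Decidable (Pre_getMinimumCost k c) := by
  unfold Pre_getMinimumCost; infer_instance
def pvWitness_getMinimumCost : Int × List Int := (2, [2, 5, 6])

def Spec_getMinimumCost (k : Int) (c : List Int) (out : Int) : Prop := out = getMinimumCost_alt k c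
instance (k : Int) (c : List Int) (out : Int) : Decidable (Spec_getMinimumCost k c out) := by
  unfold Spec_getMinimumCost; infer_instance

-- ===== CLAIM (what is proved, stated in full; the proofs are below) =====
def Claim_equal_getMinimumCost : Prop := ∀ (k : Int) (c : List Int), Dom_getMinimumCost k c → Pre_getMinimumCost k c → Spec_getMinimumCost k c (getMinimumCost k c)

-- ===== LEMMAS AND PROOFS =====

-- the value A assigns to index j of the sorted list
def pvG (cs : List Int) (K : Nat) (j : Nat) : Int :=
  cs.getD j 0 * (((j / K : Nat) : Int) + 1)

lemma pvAInner_full (cs : List Int) (o : Nat) :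
    ∀ (n i : Nat) (ans : Int), i + n ≤ cs.length →
      pvAInner cs o n i ans =
        .inr (i + n, ans + ∑ j ∈ Finset.range n, cs.getD (i + j) 0 * ((o : Int) + 1)) := by
  intro n
  induction n with
  | zero => intro i ans _; simp [pvAInner]
  | succ m ih =>
    intro i ans h
    have hi : ¬ cs.length ≤ i := by omega
    rw [pvAInner, if_neg hi, ih (i + 1) _ (by omega)]
    simp only [Sum.inr.injEq, Prod.mk.injEq, Finset.sum_range_succ']
    refine ⟨by omega, ?_⟩
    have hc : ∀ x ∈ Finset.range m,
        cs.getD (i + 1 + x) 0 * ((o : Int) + 1) = cs.getD (i + (x + 1)) 0 * ((o : Int) + 1) := by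
      intro x _; congr 2; omega
    rw [Finset.sum_congr rfl hc]
    simp only [Nat.add_zero]
    ring

lemma pvAInner_early (cs : List Int) (o : Nat) :
    ∀ (n i : Nat) (ans : Int), i ≤ cs.length → cs.length < i + n →
      pvAInner cs o n i ans =
        .inl (ans + ∑ j ∈ Finset.range (cs.length - i), cs.getD (i + j) 0 * ((o : Int) + 1)) := by
  intro n
  induction n with
  | zero => intro i ans h1 h2; omega
  | succ m ih =>
    intro i ans h1 h2
    by_cases hi : cs.length ≤ i
    · have : i = cs.length := by omega
      subst this
      simp [pvAInner]
    · rw [pvAInner, if_neg hi, ih (i + 1) _ (by omega) (by omega)]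
      have hL : cs.length - i = (cs.length - (i + 1)) + 1 := by omega
      rw [hL]
      simp only [Sum.inl.injEq, Finset.sum_range_succ']
      have hc : ∀ x ∈ Finset.range (cs.length - (i + 1)),
          cs.getD (i + 1 + x) 0 * ((o : Int) + 1) = cs.getD (i + (x + 1)) 0 * ((o : Int) + 1) := by
        intro x _; congr 2; omega
      rw [Finset.sum_congr rfl hc]
      simp only [Nat.add_zero]
      ring

lemma pvDiv_eq (K o j : Nat) (h1 : o * K ≤ j) (h2 : j < (o + 1) * K) :
    j / K = o :=
  Nat.div_eq_of_lt_le h1 h2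

lemma pvAOuter_spec (cs : List Int) (K : Nat) (hK : 1 ≤ K) :
    ∀ (fuel o : Nat) (ans : Int), cs.length ≤ o * K + fuel * K →
      pvAOuter cs K fuel (o * K) ans o = ans + ∑ j ∈ Finset.Ico (o * K) cs.length, pvG cs K j := by
  intro fuel
  induction fuel with
  | zero =>
    intro o ans h
    have : Finset.Ico (o * K) cs.length = ∅ := by
      apply Finset.Ico_eq_empty; omega
    simp [pvAOuter, this]
  | succ f ih =>
    intro o ans h
    have hsm1 : (o + 1) * K = o * K + K := Nat.succ_mul o K
    have hsm2 : (f + 1) * K = f * K + K := Nat.succ_mul f K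
    by_cases hlt : o * K < cs.length
    · rw [pvAOuter, if_pos hlt]
      by_cases h2 : (o + 1) * K ≤ cs.length
      · -- full inner pass
        rw [pvAInner_full cs o K (o * K) ans (by omega)]
        have hiK : o * K + K = (o + 1) * K := by omega
        rw [hiK]
        show pvAOuter cs K f ((o + 1) * K) _ (o + 1) = _
        rw [ih (o + 1) _ (by omega)]
        rw [add_assoc]
        congr 1
        rw [← Finset.sum_Ico_consecutive _ (by omega : o * K ≤ (o + 1) * K) h2]
        congr 1
        rw [Finset.sum_Ico_eq_sum_range]
        have hK' : (o + 1) * K - o * K = K := by omega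
        rw [hK']
        refine Finset.sum_congr rfl ?_
        intro j hj
        unfold pvG
        rw [pvDiv_eq K o (o * K + j) (by omega) (by simp only [Finset.mem_range] at hj; omega)]
      · -- early return inside the inner loop
        rw [pvAInner_early cs o K (o * K) ans (by omega) (by omega)]
        show ans + _ = ans + _
        congr 1
        rw [Finset.sum_Ico_eq_sum_range]
        refine Finset.sum_congr rfl ?_
        intro j hj
        simp only [Finset.mem_range] at hj
        unfold pvG
        rw [pvDiv_eq K o (o * K + j) (by omega) (by omega)]
    · rw [pvAOuter, if_neg hlt]
      have : Finset.Ico (o * K) cs.length = ∅ := by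
        apply Finset.Ico_eq_empty; omega
      simp [this]

lemma pvSumGetD (s : List Int) : s.sum = ∑ j ∈ Finset.range s.length, s.getD j 0 := by
  induction s with
  | nil => simp
  | cons x xs ih =>
    rw [List.sum_cons, ih, List.length_cons, Finset.sum_range_succ']
    simp [add_comm]

lemma pvDropSum (s : List Int) (n : Nat) :
    (s.drop n).sum = ∑ j ∈ Finset.Ico n s.length, s.getD j 0 := by
  rw [pvSumGetD (s.drop n), List.length_drop, Finset.sum_Ico_eq_sum_range]
  refine Finset.sum_congr rfl ?_
  intro j _
  simp [List.getD, List.getElem?_drop]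

lemma pvTakeDropSum (l : List Int) (K : Nat) :
    l.sum - (l.take K).sum = (l.drop K).sum := by
  have h := congrArg List.sum (List.take_append_drop K l)
  rw [List.sum_append] at h
  omega

lemma pvBLoop_spec (s : List Int) (K : Nat) (hK : 1 ≤ K) :
    ∀ (fuel o : Nat) (ans : Int), s.length ≤ o * K + fuel * K →
      pvBLoop s K fuel (o * K) ans ((s.drop (o * K)).sum)
        = ans + ∑ j ∈ Finset.Ico (o * K) s.length,
            s.getD j 0 * (((j / K : Nat) : Int) - (o : Int) + 1) := by
  intro fuel
  induction fuel with
  | zero =>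
    intro o ans h
    have : Finset.Ico (o * K) s.length = ∅ := by
      apply Finset.Ico_eq_empty; omega
    simp [pvBLoop, this]
  | succ f ih =>
    intro o ans h
    have hsm1 : (o + 1) * K = o * K + K := Nat.succ_mul o K
    have hsm2 : (f + 1) * K = f * K + K := Nat.succ_mul f K
    by_cases hlt : o * K < s.length
    · rw [pvBLoop, if_pos hlt]
      rw [PySem.List.slice_natCast_add s (o * K) K]
      rw [pvTakeDropSum, List.drop_drop]
      rw [show o * K + K = (o + 1) * K from by omega]
      rw [ih (o + 1) _ (by omega)]
      rw [pvDropSum]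
      by_cases h2 : (o + 1) * K ≤ s.length
      · rw [← Finset.sum_Ico_consecutive (fun j => s.getD j 0 * (((j / K : Nat) : Int) - (o : Int) + 1))
              (by omega : o * K ≤ (o + 1) * K) h2]
        rw [← Finset.sum_Ico_consecutive (fun j => s.getD j 0)
              (by omega : o * K ≤ (o + 1) * K) h2]
        have hfirst : ∑ j ∈ Finset.Ico (o * K) ((o + 1) * K),
            s.getD j 0 * (((j / K : Nat) : Int) - (o : Int) + 1)
            = ∑ j ∈ Finset.Ico (o * K) ((o + 1) * K), s.getD j 0 := by
          refine Finset.sum_congr rfl ?_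
          intro j hj
          simp only [Finset.mem_Ico] at hj
          rw [pvDiv_eq K o j hj.1 hj.2]
          ring
        have hsecond : ∑ j ∈ Finset.Ico ((o + 1) * K) s.length,
            s.getD j 0 * (((j / K : Nat) : Int) - (o : Int) + 1)
            = (∑ j ∈ Finset.Ico ((o + 1) * K) s.length,
                s.getD j 0 * (((j / K : Nat) : Int) - ((o : Int) + 1) + 1))
              + ∑ j ∈ Finset.Ico ((o + 1) * K) s.length, s.getD j 0 := by
          rw [← Finset.sum_add_distrib]
          refine Finset.sum_congr rfl ?_
          intro j _
          ring
        rw [hfirst, hsecond]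
        push_cast
        ring
      · have hempty : Finset.Ico ((o + 1) * K) s.length = ∅ := by
          apply Finset.Ico_eq_empty; omega
        rw [hempty]
        have hall : ∑ j ∈ Finset.Ico (o * K) s.length,
            s.getD j 0 * (((j / K : Nat) : Int) - (o : Int) + 1)
            = ∑ j ∈ Finset.Ico (o * K) s.length, s.getD j 0 := by
          refine Finset.sum_congr rfl ?_
          intro j hj
          simp only [Finset.mem_Ico] at hj
          rw [pvDiv_eq K o j hj.1 (by omega)]
          ring
        rw [hall]
        simp
    · rw [pvBLoop, if_neg hlt]
      have : Finset.Ico (o * K) s.length = ∅ := by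
        apply Finset.Ico_eq_empty; omega
      simp [this]

-- ===== VERDICT (by name: the statement is the Claim_ definition above) =====
theorem getMinimumCost_spec : Claim_equal_getMinimumCost := by
  intro k c _ hpre
  unfold Spec_getMinimumCost getMinimumCost getMinimumCost_alt
  by_cases hk : (c.length : Int) ≤ k
  · rw [if_pos hk, if_pos hk]
  · rw [if_neg hk, if_neg hk]
    by_cases hc : c = []
    · subst hc
      simp [PySem.List.sorted, pvAOuter, pvBLoop]
    have hk1 : 1 ≤ k := by
      rcases hpre with h | h | h
      · exact absurd h hk
      · exact h
      · exact absurd h hc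
    set s := PySem.List.sorted c (fun x => x) true with hs
    have hlen : s.length = c.length := by
      rw [hs]; exact PySem.List.length_sorted c (fun x => x) true
    set K := k.toNat with hKdef
    have hK1 : 1 ≤ K := by omega
    have hA := pvAOuter_spec s K hK1 (c.length + 1) 0 0 (by rw [hlen]; nlinarith)
    simp only [Nat.zero_mul] at hA
    have hB := pvBLoop_spec s K hK1 (s.length + 1) 0 0 (by nlinarith)
    simp only [Nat.zero_mul, List.drop_zero] at hB
    show pvAOuter s K (c.length + 1) 0 0 0 = pvBLoop s K (s.length + 1) 0 0 s.sum
    rw [hA, hB, hlen]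
    refine congrArg (0 + ·) (Finset.sum_congr rfl ?_)
    intro j _
    unfold pvG
    push_cast
    ring
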